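-- pv_equiv track=rewrite | github.com/shouvikmajumder/CMPSC-132 | LAB8.py | itemize
-- ===== SOURCE A (Python) =====
-- def itemize(num):
--     '''
--         >>> gen = itemize(-6125)
--         >>> next(gen)
--         5
--         >>> next(gen)
--         2
--         >>> next(gen)
--         1
--         >>> next(gen)
--         6
--         >>> next(gen)
--         Traceback (most recent call last):
--         ...
--         StopIteration
--     '''
--     if num == 0:
--         yield 0
--     elif num < 0:
--         num = -num
--     while num != 0:
--         digit = num % 10
--         yield digit
--         num //= 10
-- ===== SOURCE B (Python) =====
-- def itemize(num):
--     for ch in reversed(str(abs(num))):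
--         yield int(ch)
-- ===== Notes on version B (the rewrite author's own statement) =====
-- stated objective: idiomatic
-- what changed: B replaces the %/// arithmetic loop (with special cases for 0 and negatives) by iterating over the reversed decimal string of abs(num) and converting each character back to an int.
import Mathlib
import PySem

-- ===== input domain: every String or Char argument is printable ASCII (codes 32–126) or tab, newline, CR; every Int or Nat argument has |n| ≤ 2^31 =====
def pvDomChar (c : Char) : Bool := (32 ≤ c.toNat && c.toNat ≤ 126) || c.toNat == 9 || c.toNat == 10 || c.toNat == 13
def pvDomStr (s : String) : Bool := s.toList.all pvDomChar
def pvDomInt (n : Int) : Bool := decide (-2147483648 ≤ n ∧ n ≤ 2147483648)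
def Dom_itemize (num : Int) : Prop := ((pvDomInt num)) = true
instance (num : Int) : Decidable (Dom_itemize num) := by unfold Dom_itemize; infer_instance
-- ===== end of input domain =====

-- B iterates over the reversed decimal string of abs(num) instead of A's %10 // 10 arithmetic loop.
-- Equivalence is about the sequence of yielded values (list of digits, least-significant first).

-- ===== PORT A =====
-- A's `while num != 0: digit = num % 10; yield digit; num //= 10` loop.
-- The recursion guard is `0 < n` instead of Python's `n != 0` only to make the
-- recursion total; at every call site n ≥ 0, where the two conditions coincide.
def itemizeLoopA (n : Int) : List Int :=
  if h : 0 < n then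
    PySem.Int.mod n 10 :: itemizeLoopA (PySem.Int.floordiv n 10)
  else []
termination_by n.toNat
decreasing_by
  have hd : PySem.Int.floordiv n 10 = n / 10 := by
    simp [PySem.Int.floordiv, Int.fdiv_eq_ediv]
  rw [hd]
  omega

def itemize (num : Int) : List Int :=
  if num = 0 then [0]                     -- `yield 0`; the while loop then runs zero times
  else if num < 0 then itemizeLoopA (-num) -- `num = -num`, then the loop
  else itemizeLoopA num

-- ===== PORT B =====
-- `for ch in reversed(str(abs(num))): yield int(ch)`.
-- int(ch) is ported as ch.toNat - 48, exact on the digit characters '0'-'9'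
-- that str(abs(num)) consists of.
def itemize_alt (num : Int) : List Int :=
  (PySem.Int.toStr |num|).toList.reverse.map (fun c => (c.toNat : Int) - 48)

-- ===== PRECONDITION & SPEC =====
def Spec_itemize (num : Int) (out : List Int) : Prop := out = itemize_alt num
instance (num : Int) (out : List Int) : Decidable (Spec_itemize num out) := by unfold Spec_itemize; infer_instance

-- ===== CLAIM (what is proved, stated in full; the proofs are below) =====
def Claim_equal_itemize : Prop := ∀ (num : Int), Dom_itemize num → Spec_itemize num (itemize num)

-- ===== LEMMAS AND PROOFS =====

-- A's loop produces the base-10 digits, least-significant first.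
theorem itemizeLoopA_eq_digits (m : Nat) :
    itemizeLoopA (m : Int) = (Nat.digits 10 m).map Int.ofNat := by
  induction m using Nat.strong_induction_on with
  | _ m ih =>
    rw [itemizeLoopA.eq_def]
    by_cases hm : 0 < m
    · have h : (0 : Int) < (m : Int) := by exact_mod_cast hm
      rw [dif_pos h, Nat.digits_def' (by norm_num) hm]
      have hmod : PySem.Int.mod (m : Int) 10 = ((m % 10 : Nat) : Int) := by
        simp only [PySem.Int.mod, Int.fmod_eq_emod]
        omega
      have hdiv : PySem.Int.floordiv (m : Int) 10 = ((m / 10 : Nat) : Int) := by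
        simp only [PySem.Int.floordiv, Int.fdiv_eq_ediv]
        omega
      rw [hmod, hdiv, ih (m / 10) (Nat.div_lt_self hm (by norm_num))]
      try simp [Int.natAbs_abs]
    · have hm0 : m = 0 := by omega
      subst hm0
      try simp [Int.natAbs_abs]

-- core's toDigitsCore with enough fuel produces the reversed digit characters.
theorem toDigitsCore_eq (f : Nat) : ∀ (n : Nat) (ds : List Char), 0 < n → n < f →
    Nat.toDigitsCore 10 f n ds
      = ((Nat.digits 10 n).map Nat.digitChar).reverse ++ ds := by
  induction f with
  | zero => intro n ds _ h; omega
  | succ f ih =>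
    intro n ds hn hf
    rw [Nat.toDigitsCore, Nat.digits_def' (by norm_num) hn]
    by_cases h0 : n / 10 = 0
    · simp [h0]
    · have hpos : 0 < n / 10 := Nat.pos_of_ne_zero h0
      have hlt : n / 10 < f := by
        have := Nat.div_lt_self hn (show 1 < 10 by norm_num)
        omega
      simp only [h0, if_false]
      rw [ih (n / 10) _ hpos hlt]
      try simp [Int.natAbs_abs]

theorem toDigits_eq (n : Nat) (hn : 0 < n) :
    Nat.toDigits 10 n = ((Nat.digits 10 n).map Nat.digitChar).reverse := by
  rw [Nat.toDigits, toDigitsCore_eq (n + 1) n [] hn (by omega)]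
  simp

theorem digitChar_toNat (d : Nat) (hd : d < 10) : ((Nat.digitChar d).toNat : Int) - 48 = Int.ofNat d := by
  interval_cases d <;> rfl

-- ===== VERDICT (by name: the statement is the Claim_ definition above) =====
theorem itemize_spec : Claim_equal_itemize := by
  intro num _
  unfold Spec_itemize itemize itemize_alt
  by_cases h0 : num = 0
  · subst h0; decide
  · have habs : (0 : Int) < |num| := abs_pos.mpr h0
    have hnum : |num| = (num.natAbs : Int) := Int.abs_eq_natAbs num
    have hpos : 0 < num.natAbs := by omega
    rw [PySem.Int.toList_toStr]
    have hchars : PySem.Int.toChars |num| = Nat.toDigits 10 num.natAbs := by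
      simp only [PySem.Int.toChars, if_neg (not_lt.mpr habs.le)]
      congr 1
      omega
    rw [hchars, toDigits_eq _ hpos, List.reverse_reverse, List.map_map]
    have hdig : ∀ d ∈ Nat.digits 10 num.natAbs,
        ((Nat.digitChar d).toNat : Int) - 48 = Int.ofNat d := by
      intro d hd
      exact digitChar_toNat d (Nat.digits_lt_base (by norm_num) hd)
    have hB : (Nat.digits 10 num.natAbs).map ((fun c => (c.toNat : Int) - 48) ∘ Nat.digitChar)
        = (Nat.digits 10 num.natAbs).map Int.ofNat :=
      List.map_congr_left (fun d hd => hdig d hd)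
    rw [hB]
    rcases lt_or_gt_of_ne h0 with hneg | hpos'
    · rw [if_neg h0, if_pos hneg]
      have : -num = (num.natAbs : Int) := by omega
      rw [this, itemizeLoopA_eq_digits]
      try simp [Int.natAbs_abs]
    · rw [if_neg h0, if_neg (not_lt.mpr hpos'.le)]
      have : num = (num.natAbs : Int) := by omega
      rw [this, itemizeLoopA_eq_digits]
      try simp [Int.natAbs_abs]
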